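-- pv_equiv track=rewrite | github.com/Felipe-Kunst/Beecrowd.Python | Problemas do 1000 ao 1050/Bee1024.py | criptografar_linha
-- ===== SOURCE A (Python) =====
-- def criptografar_linha(linha):
--     primeira_passada = []
--     for caractere in linha:
--         if 'a' <= caractere <= 'z' or 'A' <= caractere <= 'Z':
--             primeira_passada.append(chr(ord(caractere) + 3))
--         else:
--             primeira_passada.append(caractere)
--
--     segunda_passada = ''.join(primeira_passada)[::-1]
--
--     indice_meio = len(segunda_passada) // 2
--     terceira_passada = []
--     for i in range(len(segunda_passada)):
--         if i >= indice_meio: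
--             terceira_passada.append(chr(ord(segunda_passada[i]) - 1))
--         else:
--             terceira_passada.append(segunda_passada[i])
--
--     return ''.join(terceira_passada)
-- ===== SOURCE B (Python) =====
-- def _desloca(c):
--     return chr(ord(c) + 3) if ('a' <= c <= 'z' or 'A' <= c <= 'Z') else c
--
--
-- def criptografar_linha(linha):
--     # Split the input into the two segments that land in each half of the
--     # reversed output, map each segment independently, reverse by slicing,
--     # and concatenate: no intermediate full-length string, no index test.
--     k = len(linha) - len(linha) // 2
--     tras = ''.join(_desloca(c) for c in linha[k:])
--     frente = ''.join(chr(ord(_desloca(c)) - 1) for c in linha[:k])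
--     return tras[::-1] + frente[::-1]
-- ===== Notes on version B (the rewrite author's own statement) =====
-- stated objective: alternative
-- what changed: B splits the input up front into the two segments that land in each half of the reversed output, maps each segment independently (combining the half decrement into the front segment's map), reverses each by slicing and concatenates - no intermediate full-length shifted string, no reversal pass and no per-index half test.
import Mathlib
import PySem

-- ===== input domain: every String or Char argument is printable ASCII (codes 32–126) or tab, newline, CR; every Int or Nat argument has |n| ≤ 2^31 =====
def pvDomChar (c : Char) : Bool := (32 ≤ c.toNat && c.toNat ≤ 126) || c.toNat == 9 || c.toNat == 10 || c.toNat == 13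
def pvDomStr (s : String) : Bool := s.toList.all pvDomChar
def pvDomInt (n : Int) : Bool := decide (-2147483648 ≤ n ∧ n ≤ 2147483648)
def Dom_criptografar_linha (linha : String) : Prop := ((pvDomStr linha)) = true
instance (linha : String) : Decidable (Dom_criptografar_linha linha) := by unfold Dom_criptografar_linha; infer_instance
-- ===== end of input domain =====

-- B splits the input into the two segments that land in each half of the reversed output,
-- maps each segment independently (the back-half decrement folded into one segment's map),
-- reverses each by slicing and concatenates (objective: alternative decomposition, same cost).

-- ===== PORT A =====
def criptografar_linha (linha : String) : String :=
  let primeira : List Char := linha.toList.foldl (fun acc c =>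
    if ('a' ≤ c ∧ c ≤ 'z') ∨ ('A' ≤ c ∧ c ≤ 'Z') then acc ++ [Char.ofNat (c.toNat + 3)]
    else acc ++ [c]) []
  let segunda : List Char := (PySem.List.slice? primeira none none (-1)).getD []
  let indiceMeio : Int := PySem.Int.floordiv (PySem.List.len segunda) 2
  let terceira : List Char := (PySem.List.pyRange 0 (PySem.List.len segunda) 1).foldl
    (fun acc i =>
      if i ≥ indiceMeio then acc ++ [Char.ofNat ((PySem.List.pyGetD segunda i ' ').toNat - 1)]
      else acc ++ [PySem.List.pyGetD segunda i ' ']) []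
  String.ofList terceira

-- ===== PORT B =====
-- _desloca
def pvDesloca (c : Char) : Char :=
  if ('a' ≤ c ∧ c ≤ 'z') ∨ ('A' ≤ c ∧ c ≤ 'Z') then Char.ofNat (c.toNat + 3) else c

def criptografar_linha_alt (linha : String) : String :=
  let cs : List Char := linha.toList
  let k : Int := PySem.List.len cs - PySem.Int.floordiv (PySem.List.len cs) 2
  let tras : List Char := (PySem.List.slice cs (some k) none).map pvDesloca
  let frente : List Char := (PySem.List.slice cs none (some k)).map
    (fun c => Char.ofNat ((pvDesloca c).toNat - 1))
  String.ofList (((PySem.List.slice? tras none none (-1)).getD [])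
    ++ ((PySem.List.slice? frente none none (-1)).getD []))

-- ===== PRECONDITION & SPEC =====
def Spec_criptografar_linha (linha : String) (out : String) : Prop := out = criptografar_linha_alt linha
instance (linha : String) (out : String) : Decidable (Spec_criptografar_linha linha out) := by unfold Spec_criptografar_linha; infer_instance

-- ===== CLAIM (what is proved, stated in full; the proofs are below) =====
def Claim_equal_criptografar_linha : Prop := ∀ (linha : String), Dom_criptografar_linha linha → Spec_criptografar_linha linha (criptografar_linha linha)

-- ===== LEMMAS AND PROOFS =====
-- pvDec is the back-half decrement, used only by the proof.
def pvDec (c : Char) : Char := Char.ofNat (c.toNat - 1)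

theorem criptografar_linha_eq (linha : String) :
    criptografar_linha linha = criptografar_linha_alt linha := by
  simp only [criptografar_linha, criptografar_linha_alt]
  set cs := linha.toList with hcs
  set n := cs.length with hn
  -- A's first pass is a map of pvDesloca
  have h1 : cs.foldl (fun acc c =>
      if ('a' ≤ c ∧ c ≤ 'z') ∨ ('A' ≤ c ∧ c ≤ 'Z') then acc ++ [Char.ofNat (c.toNat + 3)]
      else acc ++ [c]) [] = cs.map pvDesloca :=
    (PySem.List.foldl_congr_mem cs _ (fun acc c => acc ++ [pvDesloca c]) []
      (by intro acc c _; show _ = acc ++ [pvDesloca c]; unfold pvDesloca; split_ifs <;> rfl)).trans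
    ((PySem.List.foldl_append_singleton_eq_map pvDesloca cs []).trans (by simp))
  rw [h1, PySem.List.slice?_none_none_neg_one, Option.getD_some,
    PySem.List.len_eq, List.length_reverse, List.length_map, PySem.List.pyRange_zero_natCast,
    List.foldl_map]
  set r := (cs.map pvDesloca).reverse with hr
  have hrlen : r.length = n := by simp [hr, hn]
  -- A's third pass, as a map over indices
  have h3 : (List.range n).foldl (fun acc (k : Nat) =>
      if ((k : Int) ≥ PySem.Int.floordiv ((n : Nat) : Int) 2)
      then acc ++ [Char.ofNat ((PySem.List.pyGetD r (k : Int) ' ').toNat - 1)]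
      else acc ++ [PySem.List.pyGetD r (k : Int) ' ']) []
      = (List.range n).map (fun k =>
          if k ≥ n / 2 then pvDec (r.getD k ' ') else r.getD k ' ') := by
    refine (PySem.List.foldl_congr_mem _ _ (fun acc (k : Nat) =>
        acc ++ [if k ≥ n / 2 then pvDec (r.getD k ' ') else r.getD k ' ']) [] ?_).trans
      ((PySem.List.foldl_append_singleton_eq_map _ _ []).trans (by simp))
    intro acc k hk
    rw [PySem.List.pyGetD_natCast, PySem.Int.floordiv_eq_ediv_of_pos (by norm_num)]
    have hcond : ((k : Int) ≥ ((n : Nat) : Int) / 2) ↔ (k ≥ n / 2) := by omega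
    by_cases h : k ≥ n / 2
    · simp only [if_pos (hcond.mpr h), if_pos h]; rfl
    · simp only [if_neg (fun hc => h (hcond.mp hc)), if_neg h]
  rw [h3]
  -- the index map splits into take/drop halves
  have hsplit : (List.range n).map (fun k =>
      if k ≥ n / 2 then pvDec (r.getD k ' ') else r.getD k ' ')
      = r.take (n / 2) ++ (r.drop (n / 2)).map pvDec := by
    apply List.ext_getElem
    · simp [hrlen]; omega
    · intro i hi1 hi2
      have hin : i < n := by simpa using hi1
      have hir : i < r.length := by omega
      rw [List.getElem_map, List.getElem_range]
      by_cases h : i ≥ n / 2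
      · rw [if_pos h, List.getElem_append_right (by simp [hrlen]; omega),
          List.getElem_map, List.getElem_drop, List.getD_eq_getElem _ _ hir]
        show pvDec _ = pvDec _
        exact congrArg pvDec (getElem_congr (rfl : r = r) (by simp [hrlen]; omega) hir)
      · rw [if_neg h, List.getElem_append_left (by simp [hrlen]; omega),
          List.getElem_take, List.getD_eq_getElem _ _ hir]
  rw [hsplit]
  -- now identify the two halves with B's segments
  have hk : PySem.List.len cs - PySem.Int.floordiv (PySem.List.len cs) 2
      = ((n - n / 2 : Nat) : Int) := by
    rw [PySem.List.len_eq, PySem.Int.floordiv_eq_ediv_of_pos (by norm_num), ← hn]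
    omega
  have hs1 : PySem.List.slice cs (some ((n - n / 2 : Nat) : Int)) none = cs.drop (n - n / 2) := by
    simp
  have hs2 : PySem.List.slice cs none (some ((n - n / 2 : Nat) : Int)) = cs.take (n - n / 2) := by
    simp
  rw [hk, hs1, hs2, PySem.List.slice?_none_none_neg_one, PySem.List.slice?_none_none_neg_one]
  simp only [Option.getD_some]
  have hA : r.take (n / 2) = ((cs.drop (n - n / 2)).map pvDesloca).reverse := by
    rw [hr, List.take_reverse, List.length_map, ← hn, ← List.map_drop]
  have hB : (r.drop (n / 2)).map pvDec
      = ((cs.take (n - n / 2)).map (fun c => Char.ofNat ((pvDesloca c).toNat - 1))).reverse := by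
    rw [hr, List.drop_reverse, List.length_map, ← hn, ← List.map_take, List.map_reverse,
      List.map_map]
    rfl
  rw [hA, hB]

-- ===== VERDICT (by name: the statement is the Claim_ definition above) =====
theorem criptografar_linha_spec : Claim_equal_criptografar_linha := by
  intro linha _
  exact criptografar_linha_eq linha
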